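-- pv_equiv track=rewrite | github.com/Man17oj/IFRS9_Benchmark_tool | src/utils.py | count_na_values
-- ===== SOURCE A (Python) =====
-- from typing import List, Tuple, Optional, Dict, Any
--
-- def count_na_values(json_data: Dict[Any, Any]) -> int:
--     na_count = 0
--     if not isinstance(json_data, dict):
--         return 0
--
--     for cat_value in json_data.values():
--         if isinstance(cat_value, dict):
--             for stage_value in cat_value.values():
--                 if isinstance(stage_value, dict):
--                     for field_value in stage_value.values():
--                         if str(field_value).strip() == "N/A":
--                             na_count += 1
--                 elif str(stage_value).strip() == "N/A":
--                     na_count += 1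
--         elif str(cat_value).strip() == "N/A":
--             na_count += 1
--     return na_count
-- ===== SOURCE B (Python) =====
-- def count_na_values(json_data):
--     if not isinstance(json_data, dict):
--         return 0
--
--     def leaves(v, depth):
--         if depth < 3 and isinstance(v, dict):
--             out = []
--             for w in v.values():
--                 out += leaves(w, depth + 1)
--             return out
--         return [str(v).strip()]
--
--     flat = []
--     for v in json_data.values():
--         flat += leaves(v, 1)
--     return flat.count("N/A")
-- ===== Notes on version B (the rewrite author's own statement) =====
-- stated objective: alternative
-- what changed: Replaces the three hand-unrolled nested counting loops with a single depth-bounded recursive traversal that flattens all leaf values into one list and then counts 'N/A' with list.count.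
import Mathlib
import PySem

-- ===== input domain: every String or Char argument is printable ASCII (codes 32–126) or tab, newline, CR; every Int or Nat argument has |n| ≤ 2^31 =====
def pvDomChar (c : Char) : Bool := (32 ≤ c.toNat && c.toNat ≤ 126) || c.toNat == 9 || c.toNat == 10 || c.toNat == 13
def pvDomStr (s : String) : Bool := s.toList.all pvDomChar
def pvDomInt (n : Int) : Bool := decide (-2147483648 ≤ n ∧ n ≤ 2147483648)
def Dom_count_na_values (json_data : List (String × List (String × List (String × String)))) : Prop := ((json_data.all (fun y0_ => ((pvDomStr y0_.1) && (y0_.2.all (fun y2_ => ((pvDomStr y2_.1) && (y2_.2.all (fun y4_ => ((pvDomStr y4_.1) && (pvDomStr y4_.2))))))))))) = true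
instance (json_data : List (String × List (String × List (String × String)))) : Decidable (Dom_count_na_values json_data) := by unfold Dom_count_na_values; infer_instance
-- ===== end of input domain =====

-- B replaces A's three nested counting loops by flattening all leaves into one list and counting "N/A" once; alternative decomposition, same cost.

-- ===== PORT A =====
-- A's nested loops: at this input type every level-1/2 value is a dict and
-- level-3 values are strings, so the isinstance branches resolve statically.
def count_na_values (json_data : List (String × List (String × List (String × String)))) : Int :=
  json_data.foldl (fun na cat =>
    cat.2.foldl (fun na stage =>
      stage.2.foldl (fun na field =>
        if PySem.Str.strip field.2 == "N/A" then na + 1 else na) na) na) 0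

-- ===== PORT B =====
-- Source B's depth-guarded recursive `leaves(v, depth)` unrolls, on this fixed-depth
-- type, into one helper per depth; `flat.count("N/A")` is PySem.List.count.
def pvLeaves3 (v : String) : List String := [PySem.Str.strip v]

def pvLeaves2 (d : List (String × String)) : List String :=
  d.foldl (fun out kv => out ++ pvLeaves3 kv.2) []

def pvLeaves1 (d : List (String × List (String × String))) : List String :=
  d.foldl (fun out kv => out ++ pvLeaves2 kv.2) []

def count_na_values_alt (json_data : List (String × List (String × List (String × String)))) : Int :=
  (PySem.List.count (json_data.foldl (fun flat kv => flat ++ pvLeaves1 kv.2) []) "N/A" : Int)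

-- ===== PRECONDITION & SPEC =====
def Spec_count_na_values (json_data : List (String × List (String × List (String × String)))) (out : Int) : Prop := out = count_na_values_alt json_data
instance (json_data : List (String × List (String × List (String × String)))) (out : Int) : Decidable (Spec_count_na_values json_data out) := by unfold Spec_count_na_values; infer_instance

-- ===== CLAIM (what is proved, stated in full; the proofs are below) =====
def Claim_equal_count_na_values : Prop := ∀ (json_data : List (String × List (String × List (String × String)))), Dom_count_na_values json_data → Spec_count_na_values json_data (count_na_values json_data)

-- ===== LEMMAS AND PROOFS =====

-- the leaves produced from one level-2 dict
lemma pvLeaves2_eq (d : List (String × String)) :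
    pvLeaves2 d = d.map (fun kv => PySem.Str.strip kv.2) := by
  unfold pvLeaves2
  rw [PySem.List.foldl_append_eq_flatMap]
  induction d <;> simp_all [pvLeaves3]

lemma pvLeaves1_eq (d : List (String × List (String × String))) :
    pvLeaves1 d = d.flatMap (fun kv => kv.2.map (fun kv2 => PySem.Str.strip kv2.2)) := by
  unfold pvLeaves1
  rw [PySem.List.foldl_append_eq_flatMap]
  simp [pvLeaves2_eq]

-- count of "N/A" among mapped leaves equals the innermost counting loop
lemma count_inner (stage : List (String × String)) (acc : Int) :
    stage.foldl (fun na field =>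
      if PySem.Str.strip field.2 == "N/A" then na + 1 else na) acc
      = acc + ((stage.map (fun kv => PySem.Str.strip kv.2)).count "N/A" : Int) := by
  induction stage generalizing acc with
  | nil => simp
  | cons h t ih =>
    simp only [List.foldl_cons, List.map_cons, List.count_cons, ih]
    by_cases hc : PySem.Str.strip h.2 == "N/A"
    · simp [hc]; omega
    · simp [hc]

lemma count_mid (cat : List (String × List (String × String))) (acc : Int) :
    cat.foldl (fun na stage =>
      stage.2.foldl (fun na field =>
        if PySem.Str.strip field.2 == "N/A" then na + 1 else na) na) acc
      = acc + ((pvLeaves1 cat).count "N/A" : Int) := by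
  induction cat generalizing acc with
  | nil => simp [pvLeaves1]
  | cons h t ih =>
    rw [List.foldl_cons, count_inner, ih, pvLeaves1_eq (h :: t), List.flatMap_cons,
      List.count_append, ← pvLeaves1_eq t]
    push_cast
    ring

-- the whole outer loop against the flattened leaf list
lemma count_outer (jd : List (String × List (String × List (String × String)))) (acc : Int) :
    jd.foldl (fun na cat =>
      cat.2.foldl (fun na stage =>
        stage.2.foldl (fun na field =>
          if PySem.Str.strip field.2 == "N/A" then na + 1 else na) na) na) acc
      = acc + ((jd.flatMap (fun kv => pvLeaves1 kv.2)).count "N/A" : Int) := by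
  induction jd generalizing acc with
  | nil => simp
  | cons h t ih =>
    rw [List.foldl_cons, count_mid, ih, List.flatMap_cons, List.count_append]
    push_cast
    ring

-- ===== VERDICT (by name: the statement is the Claim_ definition above) =====
theorem count_na_values_spec : Claim_equal_count_na_values := by
  intro jd _
  show count_na_values jd = count_na_values_alt jd
  unfold count_na_values count_na_values_alt
  rw [PySem.List.foldl_append_eq_flatMap, PySem.List.count_eq, count_outer]
  simp
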